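-- pv_equiv track=rewrite | github.com/n8n-io/n8n | .github/scripts/compose-env-from-infisical.py | _escape_value
-- ===== SOURCE A (Python) =====
-- def _escape_value(val: str) -> str:
--     """docker compose .env：含空白、#、$ 等时用双引号包裹并转义。"""
--     if val == "":
--         return '""'
--     _special = ' \t\n\r#"\'\\$`'
--     need_quote = any(c in val for c in _special)
--     if "\n" in val or "\r" in val:
--         # 多行值：compose 支持有限，这里用双引号 + \n 转义
--         escaped = (
--             val.replace("\\", "\\\\")
--             .replace('"', '\\"')
--             .replace("\n", "\\n")
--             .replace("\r", "")
--         )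
--         return f'"{escaped}"'
--     if need_quote:
--         escaped = val.replace("\\", "\\\\").replace('"', '\\"')
--         return f'"{escaped}"'
--     return val
-- ===== SOURCE B (Python) =====
-- def _escape_value(val: str) -> str:
--     """Single-pass re-implementation: one traversal builds the escaped text and
--     the need-quote flag at once."""
--     if val == "":
--         return '""'
--     special = ' \t\n\r#"\'\\$`'
--     need_quote = False
--     buf = []
--     for c in val:
--         if c in special:
--             need_quote = True
--         if c == '\\':
--             buf.append('\\\\')
--         elif c == '"':
--             buf.append('\\"')
--         elif c == '\n':
--             buf.append('\\n')
--         elif c == '\r':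
--             pass
--         else:
--             buf.append(c)
--     if need_quote:
--         return '"' + ''.join(buf) + '"'
--     return val
-- ===== Notes on version B (the rewrite author's own statement) =====
-- stated objective: simpler
-- what changed: Replaces the separate any()-membership scan and the two branch-specific .replace() chains with one single pass over the characters that simultaneously sets a need-quote flag and emits each character's escaped form.
import Mathlib
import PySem

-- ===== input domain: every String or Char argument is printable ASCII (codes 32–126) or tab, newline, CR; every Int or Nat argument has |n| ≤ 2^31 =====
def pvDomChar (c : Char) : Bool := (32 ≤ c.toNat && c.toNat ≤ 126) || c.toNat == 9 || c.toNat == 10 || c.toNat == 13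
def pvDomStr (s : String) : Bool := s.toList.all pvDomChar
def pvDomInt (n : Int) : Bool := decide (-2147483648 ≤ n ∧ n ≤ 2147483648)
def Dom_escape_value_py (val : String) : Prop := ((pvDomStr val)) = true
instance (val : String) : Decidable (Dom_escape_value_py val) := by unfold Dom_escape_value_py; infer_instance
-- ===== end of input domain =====

-- B fuses A's any()-scan and branch-specific replace-chains into one pass; proved equal on all inputs.

-- ===== PORT A =====
-- A, transliterated: empty guard, any()-scan over the special characters, then
-- the multiline replace chain, the need_quote replace chain, or val itself.
def escape_value_py (val : String) : String :=
  if val = "" then "\"\"" else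
  let l := val.toList
  let special : List Char := " \t\n\r#\"'\\$`".toList
  let need_quote := special.any (fun c => PySem.Chars.isIn [c] l)
  if PySem.Chars.isIn ['\n'] l || PySem.Chars.isIn ['\r'] l then
    String.ofList ('"' :: (PySem.Chars.replace (PySem.Chars.replace (PySem.Chars.replace (PySem.Chars.replace l ['\\'] ['\\','\\']) ['"'] ['\\','"']) ['\n'] ['\\','n']) ['\r'] []) ++ ['"'])
  else if need_quote then
    String.ofList ('"' :: (PySem.Chars.replace (PySem.Chars.replace l ['\\'] ['\\','\\']) ['"'] ['\\','"']) ++ ['"'])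
  else val

-- ===== PORT B =====
-- the escaped form of one character (B's if/elif ladder)
def pvEsc (c : Char) : List Char :=
  if c = '\\' then ['\\','\\']
  else if c = '"' then ['\\','"']
  else if c = '\n' then ['\\','n']
  else if c = '\r' then []
  else [c]

def escape_value_py_alt (val : String) : String :=
  if val = "" then "\"\"" else
  let special : List Char := " \t\n\r#\"'\\$`".toList
  let st := val.toList.foldl
    (fun (st : Bool × List (List Char)) c =>
      ((st.1 || special.contains c), st.2 ++ [pvEsc c])) (false, [])
  if st.1 then String.ofList ('"' :: st.2.flatten ++ ['"']) else val

-- ===== PRECONDITION & SPEC =====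
def Spec_escape_value_py (val : String) (out : String) : Prop := out = escape_value_py_alt val
instance (val : String) (out : String) : Decidable (Spec_escape_value_py val out) := by unfold Spec_escape_value_py; infer_instance

-- ===== CLAIM (what is proved, stated in full; the proofs are below) =====
def Claim_equal_escape_value_py : Prop := ∀ (val : String), Dom_escape_value_py val → Spec_escape_value_py val (escape_value_py val)

-- ===== LEMMAS AND PROOFS =====

-- replace with a single-character pattern is a character-wise flatMap
lemma pvGo_single (a : Char) (r : List Char) :
    ∀ (fuel : Nat) (l acc : List Char), l.length ≤ fuel →
    PySem.Chars.replace.go [a] r fuel l acc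
      = acc.reverse ++ l.flatMap (fun c => if c = a then r else [c]) := by
  intro fuel
  induction fuel with
  | zero =>
    intro l acc h
    have hl : l = [] := by cases l <;> simp_all
    subst hl; simp [PySem.Chars.replace.go]
  | succ n ih =>
    intro l acc h
    cases l with
    | nil => simp [PySem.Chars.replace.go]
    | cons c t =>
      by_cases hc : a = c
      · subst hc
        have : List.isPrefixOf [a] (a :: t) = true := by simp [List.isPrefixOf]
        rw [PySem.Chars.replace.go, if_pos this]
        simp only [List.length_cons] at h
        rw [ih _ _ (by simp; omega)]
        simp
      · have : List.isPrefixOf [a] (c :: t) = false := by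
          simp [List.isPrefixOf]; exact hc
        rw [PySem.Chars.replace.go, if_neg (by simp [this])]
        simp only [List.length_cons] at h
        rw [ih _ _ (by omega)]
        simp [Ne.symm hc]

lemma pvReplace_single (l : List Char) (a : Char) (r : List Char) :
    PySem.Chars.replace l [a] r = l.flatMap (fun c => if c = a then r else [c]) := by
  rw [PySem.Chars.replace, if_neg (by simp)]
  simpa using pvGo_single a r l.length l [] le_rfl

-- membership of a single-character string is list membership
lemma pvIsIn_single (a : Char) (l : List Char) :
    PySem.Chars.isIn [a] l = l.contains a := by
  rw [Bool.eq_iff_iff, PySem.Chars.isIn_iff_infix, List.singleton_infix_iff]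
  simp

-- the four-replace multiline chain is exactly the per-character escape
lemma pvChain4_eq (l : List Char) :
    PySem.Chars.replace (PySem.Chars.replace (PySem.Chars.replace
      (PySem.Chars.replace l ['\\'] ['\\','\\']) ['"'] ['\\','"']) ['\n'] ['\\','n']) ['\r'] []
    = l.flatMap pvEsc := by
  simp only [pvReplace_single, List.flatMap_assoc]
  refine List.flatMap_congr (fun c _ => ?_)
  by_cases h1 : c = '\\'
  · subst h1; decide
  all_goals by_cases h2 : c = '"'
  · subst h2; decide
  all_goals by_cases h3 : c = '\n'
  · subst h3; decide
  all_goals by_cases h4 : c = '\r'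
  · subst h4; decide
  · simp [pvEsc, h1, h2, h3, h4]

-- the two-replace chain agrees with the per-character escape when no newline/CR occurs
lemma pvChain2_eq (l : List Char) (hn : '\n' ∉ l) (hr : '\r' ∉ l) :
    PySem.Chars.replace (PySem.Chars.replace l ['\\'] ['\\','\\']) ['"'] ['\\','"']
    = l.flatMap pvEsc := by
  simp only [pvReplace_single, List.flatMap_assoc]
  refine List.flatMap_congr (fun c hc => ?_)
  have h3 : c ≠ '\n' := fun h => hn (h ▸ hc)
  have h4 : c ≠ '\r' := fun h => hr (h ▸ hc)
  by_cases h1 : c = '\\'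
  · subst h1; decide
  all_goals by_cases h2 : c = '"'
  · subst h2; decide
  · simp [pvEsc, h1, h2, h3, h4]

-- invariant of B's single pass
lemma pvFoldl_inv (special : List Char) :
    ∀ (l : List Char) (b : Bool) (acc : List (List Char)),
    l.foldl (fun (st : Bool × List (List Char)) c =>
        ((st.1 || special.contains c), st.2 ++ [pvEsc c])) (b, acc)
      = (b || l.any (fun c => special.contains c), acc ++ l.map pvEsc) := by
  intro l
  induction l with
  | nil => simp
  | cons c t ih =>
    intro b acc
    simp only [List.foldl_cons]
    rw [ih]
    simp [Bool.or_assoc]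

-- the two any()-scans agree
lemma pvAny_comm (special l : List Char) :
    special.any (fun c => PySem.Chars.isIn [c] l) = l.any (fun c => special.contains c) := by
  simp only [pvIsIn_single]
  rw [Bool.eq_iff_iff]
  simp only [List.any_eq_true, List.contains_iff_mem]
  tauto

-- ===== VERDICT (by name: the statement is the Claim_ definition above) =====
theorem escape_value_py_spec : Claim_equal_escape_value_py := by
  intro val _
  unfold Spec_escape_value_py escape_value_py escape_value_py_alt
  by_cases hv : val = ""
  · simp [hv]
  · simp only [if_neg hv]
    set l := val.toList with hl
    set special : List Char := " \t\n\r#\"'\\$`".toList with hs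
    rw [pvFoldl_inv, pvAny_comm]
    simp only [Bool.false_or, List.nil_append]
    by_cases hml : (PySem.Chars.isIn ['\n'] l || PySem.Chars.isIn ['\r'] l) = true
    · have hnq : l.any (fun c => special.contains c) = true := by
        simp only [pvIsIn_single, Bool.or_eq_true] at hml
        simp only [List.any_eq_true]
        rcases hml with h | h
        · exact ⟨'\n', by simpa using h, by decide⟩
        · exact ⟨'\r', by simpa using h, by decide⟩
      rw [if_pos hml, hnq, if_pos rfl, pvChain4_eq, List.flatMap_def]
    · rw [if_neg hml]
      simp only [pvIsIn_single, Bool.or_eq_true, not_or, Bool.not_eq_true] at hml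
      have hn : '\n' ∉ l := by simpa using hml.1
      have hr : '\r' ∉ l := by simpa using hml.2
      by_cases hnq : l.any (fun c => special.contains c) = true
      · rw [hnq, if_pos rfl, if_pos rfl, pvChain2_eq l hn hr, List.flatMap_def]
      · rw [Bool.not_eq_true] at hnq
        rw [hnq]
        simp
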